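-- pv_equiv track=rewrite | github.com/cahna/imadethis | knock_api/thread.py | valid_create_thread_request
-- ===== SOURCE A (Python) =====
-- from typing import Mapping
--
-- def valid_create_thread_request(data) -> bool:
--     """Verify schema of data for create_thread request"""
--     if not data or not isinstance(data, Mapping):
--         return False
--     if 'users' not in data:
--         return False
--     if len(data['users']) < 1:
--         return False
--     if not all(isinstance(u, str) for u in data['users']):
--         return False
--     if any(len(u) >= 64 or len(u) < 1 for u in data['users']):
--         return False
--     return len(set(data['users'])) == len(data['users'])  # No duplicates
-- ===== SOURCE B (Python) =====
-- from typing import Mapping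
--
-- def valid_create_thread_request(data) -> bool:
--     """Verify schema of data for create_thread request"""
--     if not data or not isinstance(data, Mapping):
--         return False
--     if 'users' not in data:
--         return False
--     users = data['users']
--     if len(users) < 1:
--         return False
--     seen = set()
--     for u in users:
--         if not isinstance(u, str):
--             return False
--         if not (1 <= len(u) < 64):
--             return False
--         if u in seen:
--             return False
--         seen.add(u)
--     return True
-- ===== Notes on version B (the rewrite author's own statement) =====
-- stated objective: alternative
-- what changed: Replaced A's three separate full passes over the users list (all-isinstance scan, any-length scan, set dedup with length comparison) by a single short-circuiting loop that checks type and length bounds per element and detects duplicates with an incrementally maintained seen set.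
import Mathlib
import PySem

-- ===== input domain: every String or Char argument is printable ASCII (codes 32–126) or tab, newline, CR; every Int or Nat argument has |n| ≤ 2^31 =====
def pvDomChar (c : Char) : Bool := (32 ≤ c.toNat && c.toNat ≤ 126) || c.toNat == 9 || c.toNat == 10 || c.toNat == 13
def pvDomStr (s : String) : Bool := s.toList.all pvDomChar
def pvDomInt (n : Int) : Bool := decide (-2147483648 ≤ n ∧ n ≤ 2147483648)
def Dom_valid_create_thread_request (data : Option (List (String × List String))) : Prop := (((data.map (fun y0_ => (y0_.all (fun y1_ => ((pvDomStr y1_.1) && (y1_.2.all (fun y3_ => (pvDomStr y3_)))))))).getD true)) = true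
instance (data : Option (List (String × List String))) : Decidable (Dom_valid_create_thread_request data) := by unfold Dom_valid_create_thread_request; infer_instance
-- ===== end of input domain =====

-- B replaces A's three separate passes over data['users'] (all-isinstance scan, any-length scan,
-- set(...) dedup with length comparison) by one short-circuiting loop maintaining a seen set
-- (objective: alternative, same cost). Under the port's type the isinstance checks are always true.

-- ===== PORT A =====
def valid_create_thread_request (data : Option (List (String × List String))) : Bool :=
  match data with
  | none => false
  | some d =>
    if d.length = 0 then false
    else
      match (d.find? (fun kv => kv.1 == "users")).map (·.2) with
      | none => false
      | some users =>
        if users.length < 1 then false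
        else if !(users.all (fun _ => true)) then false
        else if users.any (fun u => decide (64 ≤ PySem.Str.len u) || decide (PySem.Str.len u < 1)) then false
        else PySem.Set.len (PySem.Set.ofList users) == PySem.List.len users


-- ===== PORT B =====
def pvAltLoop (users : List String) (seen : PySem.Set String) : Bool :=
  match users with
  | [] => true
  | u :: rest =>
    if !true then false
    else if !(decide (1 ≤ PySem.Str.len u) && decide (PySem.Str.len u < 64)) then false
    else if PySem.Set.contains seen u then false
    else pvAltLoop rest (PySem.Set.add seen u)

def valid_create_thread_request_alt (data : Option (List (String × List String))) : Bool :=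
  match data with
  | none => false
  | some d =>
    if d.length = 0 then false
    else
      match (d.find? (fun kv => kv.1 == "users")).map (·.2) with
      | none => false
      | some users =>
        if users.length < 1 then false
        else pvAltLoop users PySem.Set.empty


-- ===== PRECONDITION & SPEC =====
def Spec_valid_create_thread_request (data : Option (List (String × List String))) (out : Bool) : Prop := out = valid_create_thread_request_alt data
instance (data : Option (List (String × List String))) (out : Bool) : Decidable (Spec_valid_create_thread_request data out) := by unfold Spec_valid_create_thread_request; infer_instance

-- ===== CLAIM (what is proved, stated in full; the proofs are below) =====
def Claim_equal_valid_create_thread_request : Prop := ∀ (data : Option (List (String × List String))), Dom_valid_create_thread_request data → Spec_valid_create_thread_request data (valid_create_thread_request data)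

-- ===== LEMMAS AND PROOFS =====
theorem pvAltLoop_iff (users : List String) (seen : PySem.Set String) :
    pvAltLoop users seen = true ↔
      (∀ u ∈ users, u ≠ "" ∧ u.length < 64) ∧
      users.Nodup ∧ (∀ u ∈ users, u ∉ seen) := by
  induction users generalizing seen with
  | nil => simp [pvAltLoop]
  | cons u rest ih =>
    simp only [pvAltLoop, Bool.not_true, Bool.false_eq_true, if_false]
    by_cases hseen : u ∈ seen
    · simp [hseen]
    · simp [hseen, ih, List.nodup_cons]
      constructor
      · rintro ⟨h1, h2, h3, h4⟩
        exact ⟨⟨h1, h2⟩, ⟨fun hmem => (h4 u hmem).2 rfl, h3⟩, fun a ha => (h4 a ha).1⟩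
      · rintro ⟨⟨h1, h2⟩, ⟨hnm, h3⟩, h4⟩
        exact ⟨h1, h2, h3, fun a ha => ⟨h4 a ha, fun he => hnm (he ▸ ha)⟩⟩

theorem ofList_length_eq_iff_nodup (xs : List String) :
    (PySem.Set.ofList xs).length = xs.length ↔ xs.Nodup := by
  induction xs with
  | nil => simp [PySem.Set.ofList]
  | cons x xs ih =>
    rw [PySem.Set.ofList_cons]
    simp only [List.length_cons, List.nodup_cons]
    by_cases hx : x ∈ xs
    · constructor
      · intro h
        exfalso
        have h1 : ((PySem.Set.ofList xs).discard x).length < (PySem.Set.ofList xs).length := by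
          simp only [PySem.Set.discard]
          apply List.length_filter_lt_length_iff_exists.mpr
          exact ⟨x, (PySem.Set.mem_ofList xs x).mpr hx, by simp⟩
        have h2 := PySem.Set.length_ofList_le xs
        omega
      · rintro ⟨hc, -⟩
        exact absurd hx hc
    · have hd : (PySem.Set.ofList xs).discard x = PySem.Set.ofList xs := by
        simp only [PySem.Set.discard]
        apply List.filter_eq_self.mpr
        intro y hy
        simp only [Bool.not_eq_eq_eq_not, Bool.not_true, beq_eq_false_iff_ne, ne_eq]
        rintro rfl
        exact hx ((PySem.Set.mem_ofList xs y).mp hy)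
      rw [hd]
      constructor
      · intro h
        exact ⟨hx, ih.mp (by omega)⟩
      · rintro ⟨-, h⟩
        rw [ih.mpr h]

theorem ofList_len_eq_iff_nodup (xs : List String) :
    (PySem.Set.len (PySem.Set.ofList xs) == PySem.List.len xs) = true ↔ xs.Nodup := by
  rw [beq_iff_eq]
  simp only [PySem.Set.len, PySem.List.len]
  rw [← ofList_length_eq_iff_nodup xs]
  exact ⟨fun h => by exact_mod_cast h, fun h => by exact_mod_cast h⟩

theorem pv_main (data : Option (List (String × List String))) :
    valid_create_thread_request data = valid_create_thread_request_alt data := by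
  unfold valid_create_thread_request valid_create_thread_request_alt
  match data with
  | none => rfl
  | some d =>
    simp only
    by_cases hd : d.length = 0
    · simp [hd]
    · rw [if_neg hd, if_neg hd]
      cases hfind : (d.find? (fun kv => kv.1 == "users")).map (·.2) with
      | none => rfl
      | some users =>
        simp only
        by_cases hu : users.length < 1
        · rw [if_pos hu, if_pos hu]
        · rw [if_neg hu, if_neg hu]
          rw [Bool.eq_iff_iff]
          rw [pvAltLoop_iff]
          rw [if_neg (by simp)]
          constructor
          · intro h
            by_cases hany : users.any (fun u => decide (64 ≤ PySem.Str.len u) || decide (PySem.Str.len u < 1)) = true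
            · rw [if_pos hany] at h; exact absurd h (by simp)
            · rw [if_neg hany] at h
              refine ⟨?_, (ofList_len_eq_iff_nodup users).mp h, fun u _ hmem => by simp [PySem.Set.empty] at hmem⟩
              intro u huu
              have hb := List.any_eq_false.mp (Bool.not_eq_true _ ▸ hany) u huu
              simp only [Bool.or_eq_true, decide_eq_true_eq, not_or, not_le, not_lt] at hb
              have hlen : PySem.Str.len u = (u.length : Int) := by simp
              constructor
              · intro he
                subst he
                have h0 : PySem.Str.len "" = 0 := by decide
                omega
              · omega
          · rintro ⟨hl, hn, -⟩
            rw [if_neg]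
            · exact (ofList_len_eq_iff_nodup users).mpr hn
            · intro hq
              rcases List.any_eq_true.mp hq with ⟨v, hvv, hb⟩
              rcases hl v hvv with ⟨hne, hlt⟩
              simp only [Bool.or_eq_true, decide_eq_true_eq] at hb
              have hlen : PySem.Str.len v = (v.length : Int) := by simp
              have hpos : 0 < v.length := by
                rcases Nat.eq_zero_or_pos v.length with h0 | h
                · exact absurd (by simpa using h0) hne
                · exact h
              omega

-- ===== VERDICT (by name: the statement is the Claim_ definition above) =====
theorem valid_create_thread_request_spec : Claim_equal_valid_create_thread_request := by
  intro data _
  exact pv_main data
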